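-- pv_equiv track=rewrite | github.com/m-eduard/bucharest-hack-2024 | load_balancer/load_balancer.py | compute_cvorum_level
-- ===== SOURCE A (Python) =====
-- def compute_cvorum_level(node_levels, num_nodes):
--     max_nodes = max(node_levels.keys())
--
--     while True:
--         candidates = 0
--
--         for node_level in node_levels:
--             if node_level >= max_nodes:
--                 candidates += node_levels[node_level]
--
--         if candidates > num_nodes // 2:
--             return max_nodes
--         max_nodes -= 1
-- ===== SOURCE B (Python) =====
-- def compute_cvorum_level(node_levels, num_nodes):
--     # Sort keys descending and keep a running suffix sum: the first level whose
--     # cumulative count exceeds num_nodes // 2 is the answer (A re-scans all keys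
--     # for every candidate threshold).
--     half = num_nodes // 2
--     total = 0
--     for level in sorted(node_levels, reverse=True):
--         total += node_levels[level]
--         if total > half:
--             return level
-- ===== Notes on version B (the rewrite author's own statement) =====
-- stated objective: faster
-- what changed: Instead of re-scanning every key for each candidate threshold counting down one by one from the maximum level, B sorts the keys once in descending order and returns the first key whose running suffix sum of counts exceeds num_nodes // 2; Pre_ excludes the inputs on which A never returns (an empty dict makes max() raise ValueError, and A loops forever when no level's suffix sum exceeds num_nodes // 2) and, in the Lean association-list model only, lists with duplicate keys (a Python dict cannot have them).
import Mathlib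
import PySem

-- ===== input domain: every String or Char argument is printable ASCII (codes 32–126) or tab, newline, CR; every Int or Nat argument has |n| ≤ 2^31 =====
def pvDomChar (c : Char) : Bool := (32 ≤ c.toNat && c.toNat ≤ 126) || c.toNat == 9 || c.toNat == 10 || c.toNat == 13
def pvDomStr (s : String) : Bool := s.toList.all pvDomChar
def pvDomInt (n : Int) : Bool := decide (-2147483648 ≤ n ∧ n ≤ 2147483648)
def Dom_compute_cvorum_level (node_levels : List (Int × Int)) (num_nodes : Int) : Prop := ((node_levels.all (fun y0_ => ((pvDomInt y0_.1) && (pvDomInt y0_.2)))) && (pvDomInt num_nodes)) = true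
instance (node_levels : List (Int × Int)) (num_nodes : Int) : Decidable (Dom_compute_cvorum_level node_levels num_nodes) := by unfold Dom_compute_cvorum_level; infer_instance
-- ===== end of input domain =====

-- B replaces A's threshold countdown (a full rescan of the dict per candidate level) by one
-- descending sort of the keys and a running suffix sum; measured faster (asymptotic).


-- ===== PORT A =====
-- node_levels[k] : Python dict lookup; on the admitted inputs (distinct keys) the first
-- match in the association list is exactly the dict entry.
def pvLookup (node_levels : List (Int × Int)) (k : Int) : Int :=
  ((node_levels.find? (fun p => p.1 == k)).map Prod.snd).getD 0

-- the `while True` loop of A: fuel-bounded recursion (the fuel chosen at the call site is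
-- enough to reach the answer on every input admitted by Pre_; it only makes the loop total)
def pvALoop (node_levels : List (Int × Int)) (num_nodes : Int) : Nat → Int → Int
  | 0, max_nodes => max_nodes
  | fuel + 1, max_nodes =>
    let candidates := node_levels.foldl
      (fun acc p => if p.1 ≥ max_nodes then acc + pvLookup node_levels p.1 else acc) 0
    if candidates > PySem.Int.floordiv num_nodes 2 then max_nodes
    else pvALoop node_levels num_nodes fuel (max_nodes - 1)

def compute_cvorum_level (node_levels : List (Int × Int)) (num_nodes : Int) : Int :=
  match PySem.List.max? (node_levels.map Prod.fst) (fun x => x),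
        PySem.List.min? (node_levels.map Prod.fst) (fun x => x) with
  | some mx, some mn => pvALoop node_levels num_nodes ((mx - mn).toNat + 1) mx
  | _, _ => 0  -- empty dict: Python's max() raises ValueError (outside Pre_)

-- ===== PORT B =====
-- the for-loop of B: running suffix sum over the keys sorted descending
def pvBScan (node_levels : List (Int × Int)) (half : Int) : List Int → Int → Int
  | [], _ => 0  -- fallthrough: Python B returns None (outside Pre_)
  | level :: rest, total =>
    let total' := total + pvLookup node_levels level
    if total' > half then level else pvBScan node_levels half rest total'

def compute_cvorum_level_alt (node_levels : List (Int × Int)) (num_nodes : Int) : Int :=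
  pvBScan node_levels (PySem.Int.floordiv num_nodes 2)
    (PySem.List.sorted (node_levels.map Prod.fst) (fun x => x) true) 0

-- ===== PRECONDITION & SPEC =====
-- suffix sum of counts of levels ≥ m (spec-level quantity, used only by Pre_ and the proofs)
def pvS (node_levels : List (Int × Int)) (m : Int) : Int :=
  ((node_levels.filter (fun p => decide (m ≤ p.1))).map Prod.snd).sum

-- Pre_ excludes: the empty dict (A's max() raises ValueError); inputs where no level's
-- suffix sum of counts exceeds num_nodes // 2 (A's while loop then never returns); and
-- association lists with duplicate keys, where the assoc-list dict model (first match)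
-- and Python's dict construction (last value wins) are both defensible.
def Pre_compute_cvorum_level (node_levels : List (Int × Int)) (num_nodes : Int) : Prop :=
  (node_levels.map Prod.fst).Nodup ∧
  ∃ p ∈ node_levels, PySem.Int.floordiv num_nodes 2 < pvS node_levels p.1
instance (node_levels : List (Int × Int)) (num_nodes : Int) : Decidable (Pre_compute_cvorum_level node_levels num_nodes) := by unfold Pre_compute_cvorum_level; infer_instance

def pvWitness_compute_cvorum_level : (List (Int × Int)) × Int := ([(1, 1)], 1)

def Spec_compute_cvorum_level (node_levels : List (Int × Int)) (num_nodes : Int) (out : Int) : Prop := out = compute_cvorum_level_alt node_levels num_nodes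
instance (node_levels : List (Int × Int)) (num_nodes : Int) (out : Int) : Decidable (Spec_compute_cvorum_level node_levels num_nodes out) := by unfold Spec_compute_cvorum_level; infer_instance

-- ===== CLAIM (what is proved, stated in full; the proofs are below) =====
def Claim_equal_compute_cvorum_level : Prop := ∀ (node_levels : List (Int × Int)) (num_nodes : Int), Dom_compute_cvorum_level node_levels num_nodes → Pre_compute_cvorum_level node_levels num_nodes → Spec_compute_cvorum_level node_levels num_nodes (compute_cvorum_level node_levels num_nodes)

-- ===== LEMMAS AND PROOFS =====

-- first-match lookup on a nodup association list returns the stored value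
theorem pvLookup_eq {l : List (Int × Int)} {k v : Int}
    (hnd : (l.map Prod.fst).Nodup) (hm : (k, v) ∈ l) : pvLookup l k = v := by
  induction l with
  | nil => cases hm
  | cons p t ih =>
    simp only [List.map_cons, List.nodup_cons] at hnd
    rcases List.mem_cons.1 hm with h | h
    · subst h; simp [pvLookup]
    · have hne : p.1 ≠ k := fun he =>
        hnd.1 (he ▸ (List.mem_map.2 ⟨(k, v), h, rfl⟩))
      simpa [pvLookup, List.find?_cons, hne] using ih hnd.2 h

-- a key present in the list is looked up to a pair of the list
theorem pvLookup_pair {l : List (Int × Int)} {k : Int}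
    (hk : k ∈ l.map Prod.fst) : (k, pvLookup l k) ∈ l := by
  induction l with
  | nil => cases hk
  | cons p t ih =>
    rcases List.mem_map.1 hk with ⟨q, hq, hqk⟩
    rcases List.mem_cons.1 hq with h | h
    · subst h; subst hqk
      simp [pvLookup]
    · by_cases he : p.1 = k
      · subst he
        have hl : pvLookup (p :: t) p.1 = p.2 := by simp [pvLookup]
        rw [hl]
        exact List.mem_cons_self
      · have : k ∈ t.map Prod.fst := List.mem_map.2 ⟨q, h, hqk⟩
        have := ih this
        right
        simpa [pvLookup, List.find?_cons, he] using this

-- splitting a suffix sum at a higher bound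
theorem pvS_split (l : List (Int × Int)) (k b : Int) (hkb : k ≤ b) :
    pvS l k = pvS l b + ((l.filter (fun p => decide (k ≤ p.1) && decide (p.1 < b))).map Prod.snd).sum := by
  induction l with
  | nil => simp [pvS]
  | cons p t ih =>
    simp only [pvS, List.filter_cons] at ih ⊢
    split_ifs with h1 h2 h3 <;> simp_all <;> omega

-- the middle band is empty
theorem pvSmid_zero {l : List (Int × Int)} {k b : Int}
    (h : ∀ p ∈ l, ¬(k ≤ p.1 ∧ p.1 < b)) :
    ((l.filter (fun p => decide (k ≤ p.1) && decide (p.1 < b))).map Prod.snd).sum = 0 := by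
  have : l.filter (fun p => decide (k ≤ p.1) && decide (p.1 < b)) = [] := by
    apply List.filter_eq_nil_iff.2
    intro p hp
    have := h p hp
    simp only [Bool.and_eq_true, decide_eq_true_eq]
    omega
  simp [this]

-- the middle band holds exactly one key
theorem pvSmid_single {l : List (Int × Int)} {k vk b : Int}
    (hnd : (l.map Prod.fst).Nodup) (hm : (k, vk) ∈ l) (hkb : k < b)
    (hgap : ∀ p ∈ l, k ≤ p.1 → p.1 < b → p.1 = k) :
    ((l.filter (fun p => decide (k ≤ p.1) && decide (p.1 < b))).map Prod.snd).sum = vk := by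
  induction l with
  | nil => cases hm
  | cons p t ih =>
    simp only [List.map_cons, List.nodup_cons] at hnd
    rcases List.mem_cons.1 hm with h | h
    · subst h
      have hz : ((t.filter (fun p => decide (k ≤ p.1) && decide (p.1 < b))).map Prod.snd).sum = 0 := by
        apply pvSmid_zero
        intro q hq hcon
        have hqk : q.1 = k := hgap q (List.mem_cons_of_mem _ hq) hcon.1 hcon.2
        exact hnd.1 (hqk ▸ List.mem_map.2 ⟨q, hq, rfl⟩)
      simp only [List.filter_cons]
      have : (decide (k ≤ (k, vk).1) && decide ((k, vk).1 < b)) = true := by simp; omega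
      rw [this]
      simp [hz]
    · have hne : ¬ (k ≤ p.1 ∧ p.1 < b) := by
        intro hcon
        have hpk : p.1 = k := hgap p List.mem_cons_self hcon.1 hcon.2
        exact hnd.1 (hpk ▸ List.mem_map.2 ⟨(k, vk), h, rfl⟩)
      have hf : (decide (k ≤ p.1) && decide (p.1 < b)) = false := by
        simp; omega
      simp only [List.filter_cons, hf]
      exact ih hnd.2 h (fun q hq => hgap q (List.mem_cons_of_mem _ hq))

-- suffix sum above every key is 0
theorem pvS_empty {l : List (Int × Int)} {b : Int} (h : ∀ p ∈ l, p.1 < b) : pvS l b = 0 := by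
  have : l.filter (fun p => decide (b ≤ p.1)) = [] := by
    apply List.filter_eq_nil_iff.2
    intro p hp
    have := h p hp
    simp; omega
  simp [pvS, this]

-- A's inner for-loop computes the suffix sum pvS
theorem pvCand_aux {l t : List (Int × Int)} {m : Int}
    (hlk : ∀ p ∈ t, pvLookup l p.1 = p.2) :
    ∀ a : Int, t.foldl (fun acc p => if p.1 ≥ m then acc + pvLookup l p.1 else acc) a = a + pvS t m := by
  induction t with
  | nil => intro a; simp [pvS]
  | cons p t ih =>
    intro a
    have hp := hlk p List.mem_cons_self
    have ih' := ih (fun q hq => hlk q (List.mem_cons_of_mem _ hq))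
    simp only [List.foldl_cons, pvS, List.filter_cons]
    by_cases h : m ≤ p.1
    · have : p.1 ≥ m := h
      rw [if_pos this, ih']
      have : decide (m ≤ p.1) = true := by simpa
      rw [this]
      simp [pvS, hp]; ring
    · rw [if_neg (by omega), ih']
      have : decide (m ≤ p.1) = false := by simp; omega
      rw [this]
      simp [pvS]

theorem pvCand_eq {l : List (Int × Int)} (hnd : (l.map Prod.fst).Nodup) (m : Int) :
    l.foldl (fun acc p => if p.1 ≥ m then acc + pvLookup l p.1 else acc) 0 = pvS l m := by
  have := pvCand_aux (l := l) (t := l) (m := m) (fun p hp => pvLookup_eq hnd (by simpa using hp)) 0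
  simpa using this

-- on a strictly descending list, find? returns the unique maximal satisfying key
theorem pvFind_eq {l : List (Int × Int)} {half m : Int} :
    ∀ (ks : List Int), ks.Pairwise (· > ·) → (∀ k ∈ ks, k ∈ l.map Prod.fst) → m ∈ ks →
      half < pvS l m → (∀ k ∈ l.map Prod.fst, m < k → ¬ half < pvS l k) →
      ks.find? (fun k => decide (half < pvS l k)) = some m := by
  intro ks
  induction ks with
  | nil => intro _ _ hm; cases hm
  | cons h t ih =>
    intro hpw hmem hm hgood hH1
    by_cases hg : half < pvS l h
    · have hhm : h = m := by
        rcases List.mem_cons.1 hm with he | he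
        · exact he.symm
        · exfalso
          by_cases hc : h > m
          · exact hH1 h (hmem h List.mem_cons_self) hc hg
          · have := (List.pairwise_cons.1 hpw).1 m he
            omega
      subst hhm
      simp [hg]
    · have hne : h ≠ m := fun he => hg (he ▸ hgood)
      have hm' : m ∈ t := by
        rcases List.mem_cons.1 hm with he | he
        · exact absurd he.symm hne
        · exact he
      rw [List.find?_cons]
      have : (decide (half < pvS l h)) = false := by simp; omega
      rw [this]
      exact ih (List.pairwise_cons.1 hpw).2 (fun k hk => hmem k (List.mem_cons_of_mem _ hk)) hm' hgood hH1

-- B's scan computes find? over the sorted keys (invariant: total = pvS at the bound b)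
theorem pvBScan_eq {l : List (Int × Int)} (hnd : (l.map Prod.fst).Nodup) (half : Int) :
    ∀ (ks : List Int) (b t : Int), ks.Pairwise (· > ·) →
      (∀ k ∈ l.map Prod.fst, k ∈ ks ↔ k < b) → (∀ k ∈ ks, k ∈ l.map Prod.fst) →
      t = pvS l b →
      pvBScan l half ks t = ((ks.find? (fun k => decide (half < pvS l k))).getD 0) := by
  intro ks
  induction ks with
  | nil => intro b t _ _ _ _; simp [pvBScan]
  | cons k ks' ih =>
    intro b t hpw hiff hmem ht
    have hkmem : k ∈ l.map Prod.fst := hmem k List.mem_cons_self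
    have hpair : (k, pvLookup l k) ∈ l := pvLookup_pair hkmem
    have hkb : k < b := (hiff k hkmem).1 List.mem_cons_self
    have hgap : ∀ p ∈ l, k ≤ p.1 → p.1 < b → p.1 = k := by
      intro p hp h1 h2
      have hpk : p.1 ∈ l.map Prod.fst := List.mem_map.2 ⟨p, hp, rfl⟩
      have : p.1 ∈ k :: ks' := (hiff p.1 hpk).2 h2
      rcases List.mem_cons.1 this with he | he
      · exact he
      · have := (List.pairwise_cons.1 hpw).1 p.1 he
        omega
    have htot : t + pvLookup l k = pvS l k := by
      rw [pvS_split l k b (le_of_lt hkb), pvSmid_single hnd hpair hkb hgap, ht]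
    by_cases hg : half < pvS l k
    · have : (decide (half < pvS l k)) = true := by simpa
      simp only [pvBScan, List.find?_cons, this, htot]
      rw [if_pos (by omega)]
      rfl
    · have hdf : (decide (half < pvS l k)) = false := by simp; omega
      simp only [pvBScan, List.find?_cons, hdf, htot]
      rw [if_neg (by omega)]
      apply ih k (pvS l k) (List.pairwise_cons.1 hpw).2
      · intro k' hk'
        constructor
        · intro hin
          have := (List.pairwise_cons.1 hpw).1 k' hin
          omega
        · intro hlt
          have : k' ∈ k :: ks' := (hiff k' hk').2 (by omega)
          rcases List.mem_cons.1 this with he | he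
          · omega
          · exact he
      · intro k' hk'; exact hmem k' (List.mem_cons_of_mem _ hk')
      · rfl

-- A's while loop reaches the unique maximal satisfying key
theorem pvALoop_eq {l : List (Int × Int)} {num_nodes kmin : Int}
    (hnd : (l.map Prod.fst).Nodup)
    (hmin : ∀ k ∈ l.map Prod.fst, kmin ≤ k)
    (kmax : Int) (hmaxm : kmax ∈ l.map Prod.fst)
    (sd : List Int) (hsdpw : sd.Pairwise (· > ·)) (hsdmem : ∀ k, k ∈ sd ↔ k ∈ l.map Prod.fst) :
    ∀ (fuel : Nat) (m : Int), (m - kmin).toNat < fuel → m ≤ kmax →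
      (∀ k ∈ l.map Prod.fst, m < k → ¬ PySem.Int.floordiv num_nodes 2 < pvS l k) →
      (∃ k0 ∈ l.map Prod.fst, k0 ≤ m ∧ PySem.Int.floordiv num_nodes 2 < pvS l k0) →
      pvALoop l num_nodes fuel m =
        ((sd.find? (fun k => decide (PySem.Int.floordiv num_nodes 2 < pvS l k))).getD 0) := by
  intro fuel
  induction fuel with
  | zero => intro m hf; omega
  | succ fuel ih =>
    intro m hf hmle hH1 hH2
    simp only [pvALoop, pvCand_eq hnd m]
    by_cases hg : PySem.Int.floordiv num_nodes 2 < pvS l m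
    · rw [if_pos (by omega)]
      have hmk : m ∈ l.map Prod.fst := by
        by_contra hmk
        have hmlt : m < kmax := by
          rcases lt_or_eq_of_le hmle with h | h
          · exact h
          · exact absurd (h ▸ hmaxm) hmk
        -- least key above m: its suffix sum equals pvS l m, contradicting hH1
        have hne : kmax ∈ (l.map Prod.fst).filter (fun k => decide (m < k)) := by
          simp [List.mem_filter, hmaxm]; omega
        obtain ⟨k0, hk0⟩ : ∃ k0, PySem.List.min? ((l.map Prod.fst).filter (fun k => decide (m < k))) (fun x => x) = some k0 := by
          cases h : PySem.List.min? ((l.map Prod.fst).filter (fun k => decide (m < k))) (fun x => x) with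
          | none =>
            rw [PySem.List.min?_eq_none_iff] at h
            rw [h] at hne; cases hne
          | some k0 => exact ⟨k0, rfl⟩
        have hk0mem := PySem.List.min?_mem hk0
        have hk0min := PySem.List.min?_isMin hk0
        have hk0keys : k0 ∈ l.map Prod.fst := (List.mem_filter.1 hk0mem).1
        have hk0gt : m < k0 := by
          have := (List.mem_filter.1 hk0mem).2
          simpa using this
        have hSeq : pvS l m = pvS l k0 := by
          rw [pvS_split l m k0 (by omega), pvSmid_zero]
          · ring
          · intro p hp hcon
            have hpk : p.1 ∈ l.map Prod.fst := List.mem_map.2 ⟨p, hp, rfl⟩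
            rcases eq_or_lt_of_le hcon.1 with he | hlt
            · exact hmk (he ▸ hpk)
            · have hpf : p.1 ∈ (l.map Prod.fst).filter (fun k => decide (m < k)) := by
                simp [List.mem_filter, hpk]; omega
              have := hk0min p.1 hpf
              simp at this
              omega
        exact hH1 k0 hk0keys hk0gt (hSeq ▸ hg)
      have := pvFind_eq sd hsdpw (fun k hk => (hsdmem k).1 hk) ((hsdmem m).2 hmk) hg hH1
      rw [this]
      rfl
    · rw [if_neg (by omega)]
      obtain ⟨k0, hk0m, hk0le, hk0g⟩ := hH2
      have hk0ne : k0 ≠ m := fun he => hg (he ▸ hk0g)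
      have hkminle : kmin ≤ k0 := hmin k0 hk0m
      apply ih (m - 1)
      · omega
      · omega
      · intro k hk hlt
        rcases eq_or_lt_of_le (show m ≤ k by omega) with he | h
        · exact he ▸ hg
        · exact hH1 k hk h
      · exact ⟨k0, hk0m, by omega, hk0g⟩

-- ===== VERDICT (by name: the statement is the Claim_ definition above) =====
theorem compute_cvorum_level_spec : Claim_equal_compute_cvorum_level := by
  intro l n _ hpre
  obtain ⟨hnd, p, hp, hgood⟩ := hpre
  have hpk : p.1 ∈ l.map Prod.fst := List.mem_map.2 ⟨p, hp, rfl⟩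
  obtain ⟨kmax, hmx⟩ : ∃ m, PySem.List.max? (l.map Prod.fst) (fun x => x) = some m := by
    cases h : PySem.List.max? (l.map Prod.fst) (fun x => x) with
    | none => rw [PySem.List.max?_eq_none_iff] at h; rw [h] at hpk; cases hpk
    | some m => exact ⟨m, rfl⟩
  obtain ⟨kmin, hmn⟩ : ∃ m, PySem.List.min? (l.map Prod.fst) (fun x => x) = some m := by
    cases h : PySem.List.min? (l.map Prod.fst) (fun x => x) with
    | none => rw [PySem.List.min?_eq_none_iff] at h; rw [h] at hpk; cases hpk
    | some m => exact ⟨m, rfl⟩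
  have hmaxm : kmax ∈ l.map Prod.fst := PySem.List.max?_mem hmx
  have hmax : ∀ k ∈ l.map Prod.fst, k ≤ kmax := fun k hk => by
    simpa using PySem.List.max?_isMax hmx k hk
  have hmin : ∀ k ∈ l.map Prod.fst, kmin ≤ k := fun k hk => by
    simpa using PySem.List.min?_isMin hmn k hk
  have hsdperm : (PySem.List.sorted (l.map Prod.fst) (fun x => x) true).Perm (l.map Prod.fst) :=
    PySem.List.sorted_perm (l.map Prod.fst) (fun x => x) true
  have hsdnd : (PySem.List.sorted (l.map Prod.fst) (fun x => x) true).Nodup :=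
    hsdperm.symm.nodup hnd
  have hsdpw : (PySem.List.sorted (l.map Prod.fst) (fun x => x) true).Pairwise (· > ·) := by
    have h1 := PySem.List.sorted_pairwise_rev (l.map Prod.fst) (fun x => x)
    exact (h1.and hsdnd).imp (fun h => lt_of_le_of_ne h.1 h.2.symm)
  have hsdmem : ∀ k, k ∈ PySem.List.sorted (l.map Prod.fst) (fun x => x) true ↔ k ∈ l.map Prod.fst :=
    fun k => hsdperm.mem_iff
  have hA : compute_cvorum_level l n =
      ((PySem.List.sorted (l.map Prod.fst) (fun x => x) true).find?
        (fun k => decide (PySem.Int.floordiv n 2 < pvS l k))).getD 0 := by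
    have hloop := pvALoop_eq (num_nodes := n) hnd hmin kmax hmaxm
      _ hsdpw hsdmem ((kmax - kmin).toNat + 1) kmax (by omega) le_rfl
      (fun k hk hlt => absurd (hmax k hk) (by omega))
      ⟨p.1, hpk, hmax p.1 hpk, hgood⟩
    simp [compute_cvorum_level, hmx, hmn, hloop]
  have hB : compute_cvorum_level_alt l n =
      ((PySem.List.sorted (l.map Prod.fst) (fun x => x) true).find?
        (fun k => decide (PySem.Int.floordiv n 2 < pvS l k))).getD 0 := by
    unfold compute_cvorum_level_alt
    apply pvBScan_eq hnd _ _ (kmax + 1) 0 hsdpw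
    · intro k hk
      constructor
      · intro _
        have := hmax k hk
        omega
      · intro _
        exact (hsdmem k).2 hk
    · intro k hk
      exact (hsdmem k).1 hk
    · exact (pvS_empty (fun q hq => by
        have := hmax q.1 (List.mem_map.2 ⟨q, hq, rfl⟩)
        omega)).symm
  unfold Spec_compute_cvorum_level
  rw [hA, hB]
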